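-- pv_equiv track=rewrite | github.com/thegitguru/verba | verba/stdlib/express.py | _match_path
-- ===== SOURCE A (Python) =====
-- def _match_path(pattern: str, path: str) -> dict | None:
--     """
--     Match /users/:id style patterns.
--     Returns dict of captured params, or None if no match.
--     """
--     if pattern == "*":
--         return {}
--     p_parts = pattern.split("/")
--     r_parts = path.split("/")
--     if len(p_parts) != len(r_parts):
--         return None
--     params = {}
--     for pp, rp in zip(p_parts, r_parts):
--         if pp.startswith(":"):
--             params[pp[1:]] = rp
--         elif pp != rp:
--             return None
--     return params
-- ===== SOURCE B (Python) =====
-- def _match_path(pattern: str, path: str) -> dict | None: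
--     """Single simultaneous walk: peel one segment off pattern and path at a
--     time with str.partition, never pre-splitting or length-checking."""
--     if pattern == "*":
--         return {}
--     params = {}
--     p, r = pattern, path
--     while True:
--         pseg, psep, p = p.partition("/")
--         rseg, rsep, r = r.partition("/")
--         if pseg.startswith(":"):
--             params[pseg[1:]] = rseg
--         elif pseg != rseg:
--             return None
--         if psep != rsep:
--             return None
--         if not psep:
--             return params
-- ===== Notes on version B (the rewrite author's own statement) =====
-- stated objective: alternative
-- what changed: A pre-splits both strings on '/', compares lengths, then loops over zip(parts) with a params dict; B never splits: it walks pattern and path simultaneously, peeling one segment at a time off each with str.partition and stopping at the first mismatch, segment-count disagreement included, without any length check or intermediate lists.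
import Mathlib
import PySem

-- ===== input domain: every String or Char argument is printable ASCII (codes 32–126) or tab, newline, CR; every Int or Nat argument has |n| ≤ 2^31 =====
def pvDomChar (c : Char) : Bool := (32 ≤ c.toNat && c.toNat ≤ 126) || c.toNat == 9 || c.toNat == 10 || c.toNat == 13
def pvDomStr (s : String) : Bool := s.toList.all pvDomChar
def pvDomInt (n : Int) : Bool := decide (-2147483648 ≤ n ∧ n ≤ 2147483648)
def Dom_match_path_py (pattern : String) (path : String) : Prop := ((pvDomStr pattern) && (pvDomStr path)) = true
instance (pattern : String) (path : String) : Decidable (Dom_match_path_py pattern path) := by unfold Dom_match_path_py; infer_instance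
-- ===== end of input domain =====

-- B replaces A's split/length-check/zip-loop by a single simultaneous walk that peels one
-- segment at a time off both strings with str.partition (objective: alternative algorithm).

-- ===== PORT A =====
-- the for-loop over zip(p_parts, r_parts) with the params dict as accumulator
def pvLoopA : List (List Char × List Char) → PySem.Dict String String → Option (PySem.Dict String String)
  | [], params => some params
  | (pp, rp) :: rest, params =>
    if PySem.Chars.startswith pp [':'] then
      pvLoopA rest (params.insert (String.ofList (PySem.List.slice pp (some 1) none)) (String.ofList rp))
    else if pp ≠ rp then none
    else pvLoopA rest params

-- pattern.split("/") with a nonempty separator never raises: PySem.Str.split? = some (Chars.splitOn)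
def match_path_py (pattern : String) (path : String) : Option (List (String × String)) :=
  if pattern = "*" then some []
  else
    let p_parts := PySem.Chars.splitOn pattern.toList ['/']
    let r_parts := PySem.Chars.splitOn path.toList ['/']
    if p_parts.length ≠ r_parts.length then none
    else (pvLoopA (p_parts.zip r_parts) PySem.Dict.empty).map (fun d => d.items)

-- ===== PORT B =====
-- Source B's while-loop: p.partition("/") is ported by hand (PySem has no partition) as
-- (takeWhile (· ≠ '/'), dropWhile (· ≠ '/')): the separator was found iff the dropWhile part
-- is nonempty, and the third component is then its tail; 'psep != rsep' is the found-flags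
-- disagreeing; pseg[1:] is PySem.List.slice pseg (some 1) none. Exact on all inputs.
def pvGoB : List Char → List Char → PySem.Dict String String → Option (PySem.Dict String String)
  | p, r, params =>
    let pseg := p.takeWhile (· ≠ '/')
    let prest := p.dropWhile (· ≠ '/')
    let rseg := r.takeWhile (· ≠ '/')
    let rrest := r.dropWhile (· ≠ '/')
    let step : Option (PySem.Dict String String) :=
      if PySem.Chars.startswith pseg [':'] then
        some (params.insert (String.ofList (PySem.List.slice pseg (some 1) none)) (String.ofList rseg))
      else if pseg ≠ rseg then none
      else some params
    match step with
    | none => none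
    | some params =>
      if prest.isEmpty ≠ rrest.isEmpty then none        -- psep != rsep
      else if prest.isEmpty then some params            -- if not psep: return params
      else pvGoB prest.tail rrest.tail params
  termination_by p _ _ => p.length
  decreasing_by
    rename_i _hne hpe
    have h1 : (List.dropWhile (fun x => decide (x ≠ '/')) p).length ≤ p.length :=
      List.length_dropWhile_le _ _
    cases hdp : List.dropWhile (fun x => decide (x ≠ '/')) p with
    | nil =>
      have hpn : prest = [] := hdp
      rw [hpn] at hpe; simp at hpe
    | cons a t => rw [hdp] at h1; simp at h1 ⊢; omega

def match_path_py_alt (pattern : String) (path : String) : Option (List (String × String)) :=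
  if pattern = "*" then some []
  else (pvGoB pattern.toList path.toList PySem.Dict.empty).map (fun d => d.items)

-- ===== PRECONDITION & SPEC =====
def Spec_match_path_py (pattern : String) (path : String) (out : Option (List (String × String))) : Prop := out = match_path_py_alt pattern path
instance (pattern : String) (path : String) (out : Option (List (String × String))) : Decidable (Spec_match_path_py pattern path out) := by unfold Spec_match_path_py; infer_instance

-- ===== CLAIM (what is proved, stated in full; the proofs are below) =====
def Claim_equal_match_path_py : Prop := ∀ (pattern : String) (path : String), Dom_match_path_py pattern path → Spec_match_path_py pattern path (match_path_py pattern path)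

-- ===== LEMMAS AND PROOFS =====

-- structural reference for Chars.splitOn · ['/']
def pvSegs : List Char → List (List Char)
  | [] => [[]]
  | c :: r => if c = '/' then [] :: pvSegs r else (pvSegs r).modifyHead (c :: ·)

theorem pvSegs_ne_nil (s : List Char) : pvSegs s ≠ [] := by
  induction s with
  | nil => simp [pvSegs]
  | cons c r ih =>
    simp only [pvSegs]
    split
    · simp
    · cases h : pvSegs r with
      | nil => exact absurd h ih
      | cons a t => simp [List.modifyHead]

theorem pvSplitOn_go_spec :
    ∀ (fuel : Nat) (l cur : List Char) (acc : List (List Char)), l.length < fuel →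
      PySem.Chars.splitOn.go ['/'] fuel l cur acc
        = acc.reverse ++ (pvSegs l).modifyHead (cur.reverse ++ ·) := by
  intro fuel
  induction fuel with
  | zero => intro l cur acc h; omega
  | succ n ih =>
    intro l cur acc h
    cases l with
    | nil =>
      simp [PySem.Chars.splitOn.go, pvSegs]
    | cons c rest =>
      by_cases hc : c = '/'
      · subst hc
        rw [show PySem.Chars.splitOn.go ['/'] (n+1) ('/' :: rest) cur acc
              = PySem.Chars.splitOn.go ['/'] n rest [] (cur.reverse :: acc) by
            simp [PySem.Chars.splitOn.go, List.isPrefixOf]]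
        rw [ih rest [] (cur.reverse :: acc) (by simpa using h)]
        simp only [pvSegs]
        cases pvSegs rest <;> simp [List.modifyHead]
      · rw [show PySem.Chars.splitOn.go ['/'] (n+1) (c :: rest) cur acc
              = PySem.Chars.splitOn.go ['/'] n rest (c :: cur) acc by
            simp [PySem.Chars.splitOn.go, List.isPrefixOf, Ne.symm hc]]
        rw [ih rest (c :: cur) acc (by simpa using h)]
        simp only [pvSegs, if_neg hc]
        cases hseg : pvSegs rest with
        | nil => exact absurd hseg (pvSegs_ne_nil rest)
        | cons a t => simp [List.modifyHead]

theorem pvSplitOn_eq_segs (s : List Char) :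
    PySem.Chars.splitOn s ['/'] = pvSegs s := by
  rw [PySem.Chars.splitOn, pvSplitOn_go_spec (s.length + 1) s [] [] (by omega)]
  cases h : pvSegs s with
  | nil => exact absurd h (pvSegs_ne_nil s)
  | cons a t => simp [List.modifyHead]

-- pvSegs through takeWhile/dropWhile (the shape pvGoB peels)
theorem pvSegs_take_drop (p : List Char) :
    pvSegs p = p.takeWhile (· ≠ '/') ::
      (if (p.dropWhile (· ≠ '/')).isEmpty then []
       else pvSegs (p.dropWhile (· ≠ '/')).tail) := by
  induction p with
  | nil => simp [pvSegs]
  | cons c r ih =>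
    by_cases hc : c = '/'
    · subst hc; simp [pvSegs, List.takeWhile, List.dropWhile]
    · simp only [pvSegs, if_neg hc, ih, List.takeWhile_cons, List.dropWhile_cons]
      simp [hc, List.modifyHead]

-- the main bridge: A's (length check + zip loop) over segments = B's simultaneous walk
theorem pvMain : ∀ (n : Nat) (p r : List Char) (d : PySem.Dict String String),
    p.length < n →
    (if (pvSegs p).length = (pvSegs r).length
     then pvLoopA ((pvSegs p).zip (pvSegs r)) d else none) = pvGoB p r d := by
  intro n
  induction n with
  | zero => intro p r d h; omega
  | succ n ih =>
    intro p r d h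
    rw [pvGoB]
    rw [pvSegs_take_drop p, pvSegs_take_drop r]
    by_cases hdp : (List.dropWhile (fun x => decide (x ≠ '/')) p).isEmpty <;>
      by_cases hdr : (List.dropWhile (fun x => decide (x ≠ '/')) r).isEmpty
    · -- no '/' left on either side: one final segment each
      simp only [hdp, hdr, if_true]
      simp [pvLoopA]
      split <;> split <;> simp_all
    · -- pattern exhausted, path still has '/': segment counts differ / seps differ
      simp only [hdp, hdr]
      have := pvSegs_ne_nil (List.dropWhile (fun x => decide (x ≠ '/')) r).tail
      simp [pvLoopA]
      split
      · exact absurd ‹_› (pvSegs_ne_nil _)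
      · split <;> rfl
    · simp only [hdp, hdr]
      have := pvSegs_ne_nil (List.dropWhile (fun x => decide (x ≠ '/')) p).tail
      simp [pvLoopA]
      split
      · exact absurd ‹_› (pvSegs_ne_nil _)
      · split <;> rfl
    · -- both still have '/': peel one segment and recurse
      simp only [hdp, hdr]
      have hlt : (List.dropWhile (fun x => decide (x ≠ '/')) p).tail.length < n := by
        have h1 : (List.dropWhile (fun x => decide (x ≠ '/')) p).length ≤ p.length :=
          List.length_dropWhile_le _ _
        have h2 : (List.dropWhile (fun x => decide (x ≠ '/')) p) ≠ [] := by simp_all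
        cases hc : List.dropWhile (fun x => decide (x ≠ '/')) p with
        | nil => exact absurd hc h2
        | cons a t => rw [hc] at h1; simp at h1 ⊢; omega
      by_cases hst : PySem.Chars.startswith (List.takeWhile (fun x => decide (x ≠ '/')) p) [':'] = true
      · simp only [hst, if_true, Bool.false_eq_true, if_false, ne_eq,
          not_true_eq_false]
        simp only [List.zip_cons_cons, List.length_cons]
        rw [← ih _ _ (d.insert
            (String.ofList (PySem.List.slice (List.takeWhile (fun x => decide (x ≠ '/')) p) (some 1) none))
            (String.ofList (List.takeWhile (fun x => decide (x ≠ '/')) r))) hlt]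
        simp only [pvLoopA, hst, if_true]
        split_ifs <;> simp_all
      · by_cases heq : List.takeWhile (fun x => decide (x ≠ '/')) p
            = List.takeWhile (fun x => decide (x ≠ '/')) r
        · rw [heq] at hst
          simp only [heq, Bool.false_eq_true, if_false, ne_eq, not_true_eq_false]
          rw [if_neg hst]
          simp only [List.zip_cons_cons, List.length_cons]
          rw [← ih _ _ d hlt]
          simp only [pvLoopA, hst, if_false, Bool.false_eq_true]
          split_ifs <;> simp_all
        · simp only [List.zip_cons_cons, List.length_cons]
          simp [pvLoopA]
          split_ifs <;> simp_all

theorem match_path_eq (pattern path : String) :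
    match_path_py pattern path = match_path_py_alt pattern path := by
  unfold match_path_py match_path_py_alt
  by_cases h : pattern = "*"
  · simp [h]
  · simp only [if_neg h, pvSplitOn_eq_segs]
    rw [← pvMain (pattern.toList.length + 1) pattern.toList path.toList PySem.Dict.empty (Nat.lt_succ_self _)]
    split
    · simp_all
    · simp_all

-- ===== VERDICT (by name: the statement is the Claim_ definition above) =====
theorem match_path_py_spec : Claim_equal_match_path_py := by
  intro pattern path _
  unfold Spec_match_path_py
  exact match_path_eq pattern path
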